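-- pv_equiv track=rewrite | github.com/Pritam723/ProblemSolving | 2649-count-total-number-of-colored-cells/2649-count-total-number-of-colored-cells.py | coloredCells
-- ===== SOURCE A (Python) =====
-- def coloredCells(n: int) -> int:
--     if(n == 1): return 1
--
--     base = 1
--     total = 1
--
--     i = 1
--     while(i < n):
--         total = total + 2 * base + 2
--         base = base + 2
--         i = i + 1
--
--     return total
-- ===== SOURCE B (Python) =====
-- def coloredCells(n: int) -> int:
--     # 1 center cell plus 4*(1+2+...+(n-1)) cells added over the steps,
--     # clamped so fewer than one step adds nothing.
--     t = max(n - 1, 0)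
--     return 1 + 2 * t * (t + 1)
-- ===== Notes on version B (the rewrite author's own statement) =====
-- stated objective: faster
-- what changed: Replaces the O(n) accumulation loop with the closed form 1 + 2*(n-1)*n (clamped at n<=1), derived from summing the 4*(i) cells added per step.
import Mathlib
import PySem

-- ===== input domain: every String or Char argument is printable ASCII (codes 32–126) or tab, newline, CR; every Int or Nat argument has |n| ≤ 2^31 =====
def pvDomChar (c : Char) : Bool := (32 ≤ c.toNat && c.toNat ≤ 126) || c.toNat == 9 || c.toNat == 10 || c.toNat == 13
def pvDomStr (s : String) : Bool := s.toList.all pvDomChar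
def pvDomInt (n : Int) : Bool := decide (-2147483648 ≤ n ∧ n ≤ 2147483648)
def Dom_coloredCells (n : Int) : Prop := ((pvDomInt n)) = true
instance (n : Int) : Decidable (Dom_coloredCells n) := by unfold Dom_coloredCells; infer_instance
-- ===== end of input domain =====

-- B replaces A's O(n) accumulation loop with the closed form 1 + 2*(n-1)*n (clamped at n ≤ 1): objective = faster (asymptotic).


-- ===== PORT A =====
-- while(i < n): total += 2*base + 2; base += 2; i += 1
def coloredCellsLoop (n base total i : Int) : Int :=
  if _h : i < n then
    coloredCellsLoop n (base + 2) (total + 2 * base + 2) (i + 1)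
  else
    total
termination_by (n - i).toNat
decreasing_by omega

def coloredCells (n : Int) : Int :=
  if n = 1 then 1
  else coloredCellsLoop n 1 1 1

-- ===== PORT B =====
def coloredCells_alt (n : Int) : Int :=
  let t := max (n - 1) 0
  1 + 2 * t * (t + 1)

-- ===== PRECONDITION & SPEC =====
def Spec_coloredCells (n : Int) (out : Int) : Prop := out = coloredCells_alt n
instance (n : Int) (out : Int) : Decidable (Spec_coloredCells n out) := by unfold Spec_coloredCells; infer_instance

-- ===== CLAIM (what is proved, stated in full; the proofs are below) =====
def Claim_equal_coloredCells : Prop := ∀ (n : Int), Dom_coloredCells n → Spec_coloredCells n (coloredCells n)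

-- ===== LEMMAS AND PROOFS =====
-- Loop invariant: starting at step i ≤ n with base = 2i-1 and total = 2i²-2i+1, the loop returns 2n²-2n+1.
theorem coloredCellsLoop_eq (n i : Int) (h : i ≤ n) :
    coloredCellsLoop n (2 * i - 1) (2 * i * i - 2 * i + 1) i = 2 * n * n - 2 * n + 1 := by
  rcases lt_or_eq_of_le h with hlt | heq
  · rw [coloredCellsLoop, dif_pos hlt]
    have h1 : (2 : Int) * i - 1 + 2 = 2 * (i + 1) - 1 := by ring
    have h2 : (2 : Int) * i * i - 2 * i + 1 + 2 * (2 * i - 1) + 2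
        = 2 * (i + 1) * (i + 1) - 2 * (i + 1) + 1 := by ring
    rw [h1, h2]
    exact coloredCellsLoop_eq n (i + 1) (by omega)
  · subst heq
    rw [coloredCellsLoop, dif_neg (lt_irrefl i)]
termination_by (n - i).toNat
decreasing_by omega

theorem coloredCellsLoop_low (n : Int) (h : ¬ 1 < n) :
    coloredCellsLoop n 1 1 1 = 1 := by
  rw [coloredCellsLoop, dif_neg h]

-- ===== VERDICT (by name: the statement is the Claim_ definition above) =====
theorem coloredCells_spec : Claim_equal_coloredCells := by
  intro n _
  unfold Spec_coloredCells coloredCells coloredCells_alt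
  by_cases hn : n = 1
  · simp [hn]
  · rw [if_neg hn]
    by_cases h1 : 1 < n
    · have := coloredCellsLoop_eq n 1 (le_of_lt h1)
      norm_num at this
      rw [this]
      have ht : max (n - 1) 0 = n - 1 := by omega
      rw [ht]; ring
    · rw [coloredCellsLoop_low n h1]
      have ht : max (n - 1) 0 = 0 := by omega
      simp [ht]
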